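-- pv_equiv track=rewrite | github.com/ostollmann/Code-Backup | python/calc.py | base10_integer
-- ===== SOURCE A (Python) =====
-- def base10_integer(b):
-- 	b.reverse()
-- 	p = 0
-- 	i = 0
-- 	for j in b:
-- 		i += j*(10**p)
-- 		p += 1
-- 	return i
-- ===== SOURCE B (Python) =====
-- def base10_integer(b):
--     b.reverse()
--     i = 0
--     for j in reversed(b):
--         i = i*10 + j
--     return i
-- ===== Notes on version B (the rewrite author's own statement) =====
-- stated objective: faster
-- what changed: Replaces the power-summation loop (recomputing 10**p each step) with Horner's method over the digits in most-significant-first order, maintaining a single running accumulator; the in-place b.reverse() is preserved.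
import Mathlib
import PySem

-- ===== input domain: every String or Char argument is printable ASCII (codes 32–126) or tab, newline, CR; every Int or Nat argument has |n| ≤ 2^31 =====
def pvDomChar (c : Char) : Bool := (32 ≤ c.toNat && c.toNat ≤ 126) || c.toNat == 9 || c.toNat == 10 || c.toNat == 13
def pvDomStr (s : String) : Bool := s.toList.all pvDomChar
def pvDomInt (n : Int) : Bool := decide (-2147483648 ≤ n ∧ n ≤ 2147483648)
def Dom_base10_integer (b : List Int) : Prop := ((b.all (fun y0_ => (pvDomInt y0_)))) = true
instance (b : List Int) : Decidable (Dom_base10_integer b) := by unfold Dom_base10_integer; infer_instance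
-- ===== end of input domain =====

-- ===== PORT A =====
-- A: reverse in place, then sum j*10^p
def base10_integer (b : List Int) : Int :=
  (b.reverse.foldl (fun (st : Int × Int) j => (st.1 + j * 10 ^ st.2.toNat, st.2 + 1)) (0, 0)).1

-- ===== PORT B =====
-- B: Horner's method over reversed(b) after the in-place reverse (return value only;
-- A and B both reverse the argument in place in Python)
def base10_integer_alt (b : List Int) : Int :=
  let br := b.reverse
  br.reverse.foldl (fun i j => i * 10 + j) 0

-- ===== PRECONDITION & SPEC =====
def Spec_base10_integer (b : List Int) (out : Int) : Prop := out = base10_integer_alt b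
instance (b : List Int) (out : Int) : Decidable (Spec_base10_integer b out) := by unfold Spec_base10_integer; infer_instance

-- ===== CLAIM (what is proved, stated in full; the proofs are below) =====
def Claim_equal_base10_integer : Prop := ∀ (b : List Int), Dom_base10_integer b → Spec_base10_integer b (base10_integer b)

-- ===== LEMMAS AND PROOFS =====

-- ===== VERDICT (by name: the statement is the Claim_ definition above) =====
theorem foldA_horner (l : List Int) (i p : Int) (hp : 0 ≤ p) :
    (l.foldl (fun (st : Int × Int) j => (st.1 + j * 10 ^ st.2.toNat, st.2 + 1)) (i, p)).1
      = i + 10 ^ p.toNat * (l.reverse.foldl (fun a j => a * 10 + j) 0) := by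
  induction l generalizing i p with
  | nil => simp
  | cons j l ih =>
    simp only [List.foldl_cons, List.reverse_cons, List.foldl_append, List.foldl_cons,
      List.foldl_nil]
    rw [ih _ _ (by omega)]
    have : (p + 1).toNat = p.toNat + 1 := by omega
    rw [this, pow_succ]
    ring

theorem base10_integer_spec : Claim_equal_base10_integer := by
  intro b _
  unfold Spec_base10_integer base10_integer base10_integer_alt
  rw [foldA_horner _ _ _ le_rfl]
  simp
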